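-- pv_equiv track=rewrite | github.com/Nick-heo-eg/jnis-spec | scripts/evaluate_system.py | _assign_level
-- ===== SOURCE A (Python) =====
-- def _assign_level(violations: list[str]) -> str:
--     if not violations:
--         return "L3"
--     has = {
--         "L0": any("L0 VIOLATION" in v for v in violations),
--         "L1": any("L1 VIOLATION" in v for v in violations),
--         "L2": any("L2 VIOLATION" in v for v in violations),
--         "L3": any("L3 VIOLATION" in v for v in violations),
--     }
--     if has["L0"] or has["L1"]:
--         return "NON_COMPLIANT"
--     if has["L2"]:
--         return "L1"
--     if has["L3"]:
--         return "L2"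
--     return "NON_COMPLIANT"
-- ===== SOURCE B (Python) =====
-- def _assign_level(violations: list[str]) -> str:
--     if not violations:
--         return "L3"
--     best = 4  # 4 = no "Lk VIOLATION" marker found yet
--     for v in violations:
--         for k in range(best):  # only levels lower than the current best can matter
--             if f"L{k} VIOLATION" in v:
--                 best = k
--                 break
--     return ("NON_COMPLIANT", "NON_COMPLIANT", "L1", "L2", "NON_COMPLIANT")[best]
-- ===== Notes on version B (the rewrite author's own statement) =====
-- stated objective: alternative
-- what changed: Instead of four boolean substring flags plus a branch cascade, B computes the numerically smallest violation level present (with pruning: each string is only scanned for levels below the current best) and maps that minimum through a fixed result table.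
import Mathlib
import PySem

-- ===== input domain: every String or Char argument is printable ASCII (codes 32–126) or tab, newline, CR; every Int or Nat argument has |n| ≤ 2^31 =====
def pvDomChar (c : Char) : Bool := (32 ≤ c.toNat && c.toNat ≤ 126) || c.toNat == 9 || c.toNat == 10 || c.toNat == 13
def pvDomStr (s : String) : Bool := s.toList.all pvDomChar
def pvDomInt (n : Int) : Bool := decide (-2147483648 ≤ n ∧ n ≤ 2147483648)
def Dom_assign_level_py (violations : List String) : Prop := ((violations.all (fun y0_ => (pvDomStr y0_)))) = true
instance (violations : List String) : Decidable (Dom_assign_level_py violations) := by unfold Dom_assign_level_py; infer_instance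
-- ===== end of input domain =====

-- B computes the minimal violation level present (pruned per-string scan) and maps it through a table (objective: alternative).


-- ===== PORT A =====
def assign_level_py (violations : List String) : String :=
  if violations = [] then "L3"
  else
    let has : PySem.Dict String Bool :=
      (((PySem.Dict.empty.insert "L0" (violations.any fun v => PySem.Str.isIn "L0 VIOLATION" v)).insert
          "L1" (violations.any fun v => PySem.Str.isIn "L1 VIOLATION" v)).insert
          "L2" (violations.any fun v => PySem.Str.isIn "L2 VIOLATION" v)).insert
          "L3" (violations.any fun v => PySem.Str.isIn "L3 VIOLATION" v)
    if has.getD "L0" false || has.getD "L1" false then "NON_COMPLIANT"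
    else if has.getD "L2" false then "L1"
    else if has.getD "L3" false then "L2"
    else "NON_COMPLIANT"

-- ===== PORT B =====
-- inner loop: 'for k in range(best): if f"L{k} VIOLATION" in v: best = k; break'
def pvStep (best : Nat) (v : String) : Nat :=
  (((List.range best).find? (fun k => PySem.Str.isIn ("L" ++ toString k ++ " VIOLATION") v)).getD best)

def assign_level_py_alt (violations : List String) : String :=
  if violations = [] then "L3"
  else
    let best := violations.foldl pvStep 4
    (["NON_COMPLIANT", "NON_COMPLIANT", "L1", "L2", "NON_COMPLIANT"].getD best "")

-- ===== PRECONDITION & SPEC =====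
def Spec_assign_level_py (violations : List String) (out : String) : Prop := out = assign_level_py_alt violations
instance (violations : List String) (out : String) : Decidable (Spec_assign_level_py violations out) := by unfold Spec_assign_level_py; infer_instance

-- ===== CLAIM (what is proved, stated in full; the proofs are below) =====
def Claim_equal_assign_level_py : Prop := ∀ (violations : List String), Dom_assign_level_py violations → Spec_assign_level_py violations (assign_level_py violations)

-- ===== LEMMAS AND PROOFS =====

/-- Per-string minimal level among the four markers (4 = none). -/
def pvLevel (v : String) : Nat :=
  if PySem.Str.isIn "L0 VIOLATION" v then 0
  else if PySem.Str.isIn "L1 VIOLATION" v then 1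
  else if PySem.Str.isIn "L2 VIOLATION" v then 2
  else if PySem.Str.isIn "L3 VIOLATION" v then 3
  else 4

theorem pvQ0 : ("L" ++ toString (0 : Nat) ++ " VIOLATION" : String) = "L0 VIOLATION" := rfl
theorem pvQ1 : ("L" ++ toString (1 : Nat) ++ " VIOLATION" : String) = "L1 VIOLATION" := rfl
theorem pvQ2 : ("L" ++ toString (2 : Nat) ++ " VIOLATION" : String) = "L2 VIOLATION" := rfl
theorem pvQ3 : ("L" ++ toString (3 : Nat) ++ " VIOLATION" : String) = "L3 VIOLATION" := rfl

/-- One pruned inner scan equals taking the min with the string's level. -/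
theorem pvStep_eq (b : Nat) (hb : b ≤ 4) (v : String) : pvStep b v = min b (pvLevel v) := by
  unfold pvStep pvLevel
  interval_cases b <;>
    simp only [List.range_succ, List.range_zero, List.nil_append, List.cons_append,
      List.find?_cons, List.find?_nil, pvQ0, pvQ1, pvQ2, pvQ3] <;>
    by_cases h0 : PySem.Str.isIn "L0 VIOLATION" v <;>
    by_cases h1 : PySem.Str.isIn "L1 VIOLATION" v <;>
    by_cases h2 : PySem.Str.isIn "L2 VIOLATION" v <;>
    by_cases h3 : PySem.Str.isIn "L3 VIOLATION" v <;>
    simp_all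

/-- Arithmetic core: merging one string's level into the running minimum. -/
theorem pv_min_chain (b : Nat) (hb : b ≤ 4) (c0 c1 c2 c3 d0 d1 d2 d3 : Bool) :
    min (min b (if c0 then 0 else if c1 then 1 else if c2 then 2 else if c3 then 3 else 4))
        (if d0 then 0 else if d1 then 1 else if d2 then 2 else if d3 then 3 else 4)
      = min b (if c0 || d0 then 0 else if c1 || d1 then 1
               else if c2 || d2 then 2 else if c3 || d3 then 3 else 4) := by
  interval_cases b <;> revert c0 c1 c2 c3 d0 d1 d2 d3 <;> decide

/-- The whole fold computes the cascade of the four `any` scans, as a minimum. -/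
theorem pv_fold_eq (xs : List String) : ∀ b, b ≤ 4 →
    xs.foldl pvStep b =
      min b
        (if xs.any (fun v => PySem.Str.isIn "L0 VIOLATION" v) then 0
         else if xs.any (fun v => PySem.Str.isIn "L1 VIOLATION" v) then 1
         else if xs.any (fun v => PySem.Str.isIn "L2 VIOLATION" v) then 2
         else if xs.any (fun v => PySem.Str.isIn "L3 VIOLATION" v) then 3
         else 4) := by
  induction xs with
  | nil => intro b hb; simp; omega
  | cons x xs ih =>
    intro b hb
    rw [List.foldl_cons, pvStep_eq b hb x,
        ih (min b (pvLevel x)) (le_trans (Nat.min_le_left _ _) hb)]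
    simp only [List.any_cons, pvLevel]
    exact pv_min_chain b hb _ _ _ _ _ _ _ _

-- ===== VERDICT (by name: the statement is the Claim_ definition above) =====
theorem assign_level_py_spec : Claim_equal_assign_level_py := by
  intro violations _
  unfold Spec_assign_level_py assign_level_py assign_level_py_alt
  by_cases h : violations = []
  · simp [h]
  · simp only [h, if_false, pv_fold_eq violations 4 (le_refl 4)]
    cases h0 : violations.any (fun v => PySem.Str.isIn "L0 VIOLATION" v) <;>
    cases h1 : violations.any (fun v => PySem.Str.isIn "L1 VIOLATION" v) <;>
    cases h2 : violations.any (fun v => PySem.Str.isIn "L2 VIOLATION" v) <;>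
    cases h3 : violations.any (fun v => PySem.Str.isIn "L3 VIOLATION" v) <;>
    rfl
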